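-- pv_equiv track=rewrite | github.com/fabriziosalmi/dnsmate | backend/app/services/password_policy.py | _contains_personal_info
-- ===== SOURCE A (Python) =====
-- def _contains_personal_info(password: str, user_info: dict) -> bool:
--     """Check if password contains personal information"""
--     password_lower = password.lower()
--
--     # Check email parts
--     if user_info.get('email'):
--         email_parts = user_info['email'].lower().split('@')
--         username = email_parts[0]
--         if len(username) >= 3 and username in password_lower:
--             return True
--
--         # Check domain parts
--         if len(email_parts) > 1:
--             domain_parts = email_parts[1].split('.')
--             for part in domain_parts:
--                 if len(part) >= 3 and part in password_lower:
--                     return True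
--
--     # Check name parts
--     for field in ['first_name', 'last_name']:
--         if user_info.get(field):
--             name = user_info[field].lower()
--             if len(name) >= 3 and name in password_lower:
--                 return True
--
--     return False
-- ===== SOURCE B (Python) =====
-- def _contains_personal_info(password: str, user_info: dict) -> bool:
--     """Inverted search: build a set of forbidden tokens, then slide a window of
--     each token length across the password and test each window by set lookup."""
--     tokens = set()
--     email = user_info.get('email')
--     if email:
--         parts = email.lower().split('@')
--         if len(parts[0]) >= 3:
--             tokens.add(parts[0])
--         if len(parts) > 1:
--             for part in parts[1].split('.'):
--                 if len(part) >= 3: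
--                     tokens.add(part)
--     for field in ('first_name', 'last_name'):
--         value = user_info.get(field)
--         if value:
--             name = value.lower()
--             if len(name) >= 3:
--                 tokens.add(name)
--     pw = password.lower()
--     lengths = {len(t) for t in tokens}
--     return any(pw[i:i + L] in tokens
--                for L in lengths
--                for i in range(len(pw) - L + 1))
-- ===== Notes on version B (the rewrite author's own statement) =====
-- stated objective: alternative
-- what changed: B inverts the search direction: instead of testing each personal token as a substring of the password (A's repeated early-return `in` checks), it builds a hash set of forbidden tokens, collects their lengths, and slides a window of each length across the password, answering by set lookup of each window.
import Mathlib
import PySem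

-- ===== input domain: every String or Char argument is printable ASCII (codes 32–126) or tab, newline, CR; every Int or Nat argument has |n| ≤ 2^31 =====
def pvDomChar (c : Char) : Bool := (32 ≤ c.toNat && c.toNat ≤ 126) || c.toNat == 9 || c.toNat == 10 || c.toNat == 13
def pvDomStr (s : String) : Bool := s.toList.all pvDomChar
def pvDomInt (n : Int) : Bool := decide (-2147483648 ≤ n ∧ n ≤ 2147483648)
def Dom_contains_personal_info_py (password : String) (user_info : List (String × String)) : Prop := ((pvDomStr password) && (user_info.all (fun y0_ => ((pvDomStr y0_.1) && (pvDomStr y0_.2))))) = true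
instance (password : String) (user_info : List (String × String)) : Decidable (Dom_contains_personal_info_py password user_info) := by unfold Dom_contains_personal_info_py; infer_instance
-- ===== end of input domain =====

-- B replaces A's per-token substring searches by the opposite traversal: a set of forbidden
-- tokens is built once, then windows of each token length slide over the password and each
-- window is tested by set lookup (objective: alternative algorithm, same result).

-- ===== PORT A =====
-- dict lookup user_info.get(k): first match in the association list (exact for a Python dict)
-- s.split(sep) with a nonempty literal sep: Str.split? never returns none there
def ciSplit (s sep : String) : List String :=
  (PySem.Str.split? s sep).getD []

def ciGet (ui : List (String × String)) (k : String) : Option String :=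
  PySem.Dict.get? (PySem.Dict.mk ui) k

def ciDomainLoop (password_lower : String) : List String → Bool
  | [] => false
  | part :: rest =>
    if decide (3 ≤ PySem.Str.len part) && PySem.Str.isIn part password_lower then true
    else ciDomainLoop password_lower rest

def ciFieldLoop (password_lower : String) (user_info : List (String × String)) : List String → Bool
  | [] => false
  | field :: rest =>
    match ciGet user_info field with
    | some v =>
      if v ≠ "" then
        let name := PySem.Str.lower v
        if decide (3 ≤ PySem.Str.len name) && PySem.Str.isIn name password_lower then true
        else ciFieldLoop password_lower user_info rest
      else ciFieldLoop password_lower user_info rest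
    | none => ciFieldLoop password_lower user_info rest

def contains_personal_info_py (password : String) (user_info : List (String × String)) : Bool :=
  let password_lower := PySem.Str.lower password
  let emailCheck :=
    match ciGet user_info "email" with
    | some e =>
      if e ≠ "" then
        let email_parts := ciSplit (PySem.Str.lower e) "@"
        let username := email_parts.headD ""
        if decide (3 ≤ PySem.Str.len username) && PySem.Str.isIn username password_lower then true
        else if email_parts.length > 1 then
          ciDomainLoop password_lower (ciSplit (email_parts.getD 1 "") ".")
        else false
      else false
    | none => false
  if emailCheck then true
  else ciFieldLoop password_lower user_info ["first_name", "last_name"]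

-- ===== PORT B =====
-- tokens = set() built with the same guards as Source B, via PySem.Set.add
def cpiTokens (user_info : List (String × String)) : PySem.Set String :=
  let t0 : PySem.Set String := PySem.Set.empty
  let t1 :=
    match ciGet user_info "email" with
    | some e =>
      if e ≠ "" then
        let parts := ciSplit (PySem.Str.lower e) "@"
        let ta := if decide (3 ≤ PySem.Str.len (parts.headD "")) then
            PySem.Set.add t0 (parts.headD "") else t0
        if parts.length > 1 then
          (ciSplit (parts.getD 1 "") ".").foldl
            (fun s part => if decide (3 ≤ PySem.Str.len part) then PySem.Set.add s part else s) ta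
        else ta
      else t0
    | none => t0
  ["first_name", "last_name"].foldl
    (fun s field =>
      match ciGet user_info field with
      | some v =>
        if v ≠ "" then
          let name := PySem.Str.lower v
          if decide (3 ≤ PySem.Str.len name) then PySem.Set.add s name else s
        else s
      | none => s) t1

-- `any(pw[i:i+L] in tokens for L in lengths for i in range(len(pw)-L+1))`
-- (any over a set: the boolean result does not depend on iteration order)
def contains_personal_info_py_alt (password : String) (user_info : List (String × String)) : Bool :=
  let tokens := cpiTokens user_info
  let pw := PySem.Str.lower password
  let lengths : PySem.Set Int := PySem.Set.ofList (tokens.map PySem.Str.len)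
  lengths.any (fun L =>
    (PySem.List.pyRange 0 (PySem.Str.len pw - L + 1) 1).any (fun i =>
      PySem.Set.contains tokens (PySem.Str.slice pw (some i) (some (i + L)))))

-- ===== PRECONDITION & SPEC =====
def Spec_contains_personal_info_py (password : String) (user_info : List (String × String)) (out : Bool) : Prop := out = contains_personal_info_py_alt password user_info
instance (password : String) (user_info : List (String × String)) (out : Bool) : Decidable (Spec_contains_personal_info_py password user_info out) := by unfold Spec_contains_personal_info_py; infer_instance

-- ===== CLAIM =====
def Claim_equal_contains_personal_info_py : Prop := ∀ (password : String) (user_info : List (String × String)), Dom_contains_personal_info_py password user_info → Spec_contains_personal_info_py password user_info (contains_personal_info_py password user_info)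

-- ===== LEMMAS AND PROOFS =====

-- proof-side: the raw candidate tokens A tests, in A's order, without the length guard
def cpiNameOf (ui : List (String × String)) (field : String) : Option String :=
  match ciGet ui field with
  | some v => if v ≠ "" then some (PySem.Str.lower v) else none
  | none => none

def cpiRaw (user_info : List (String × String)) : List String :=
  (match ciGet user_info "email" with
   | some e =>
     if e ≠ "" then
       let parts := ciSplit (PySem.Str.lower e) "@"
       parts.headD "" ::
         (if parts.length > 1 then ciSplit (parts.getD 1 "") "." else [])
     else []
   | none => []) ++
  (["first_name", "last_name"].filterMap (cpiNameOf user_info))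

def cpiCandTest (password_lower : String) (tok : String) : Bool :=
  decide (3 ≤ PySem.Str.len tok) && PySem.Str.isIn tok password_lower

theorem ciDomainLoop_eq_any (pw : String) (l : List String) :
    ciDomainLoop pw l = l.any (cpiCandTest pw) := by
  induction l with
  | nil => rfl
  | cons x xs ih =>
    have hc : (decide (3 ≤ PySem.Str.len x) && PySem.Str.isIn x pw) = cpiCandTest pw x := rfl
    simp only [ciDomainLoop, List.any_cons, hc, ih]
    cases cpiCandTest pw x <;> simp

theorem ciFieldLoop_eq_any (pw : String) (ui : List (String × String)) (fields : List String) :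
    ciFieldLoop pw ui fields = (fields.filterMap (cpiNameOf ui)).any (cpiCandTest pw) := by
  induction fields with
  | nil => rfl
  | cons f fs ih =>
    cases h : ciGet ui f with
    | none =>
      have hn : cpiNameOf ui f = none := by simp [cpiNameOf, h]
      simp only [ciFieldLoop, h, List.filterMap_cons, hn]
      exact ih
    | some v =>
      by_cases hv : v = ""
      · have hn : cpiNameOf ui f = none := by simp [cpiNameOf, h, hv]
        simp only [ciFieldLoop, h, List.filterMap_cons, hn, hv, ne_eq, not_true_eq_false, if_false]
        exact ih
      · have hc : (decide (3 ≤ PySem.Str.len (PySem.Str.lower v)) &&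
            PySem.Str.isIn (PySem.Str.lower v) pw) = cpiCandTest pw (PySem.Str.lower v) := rfl
        have hn : cpiNameOf ui f = some (PySem.Str.lower v) := by simp [cpiNameOf, h, hv]
        simp only [ciFieldLoop, h, List.filterMap_cons, hn, hv, ne_eq, not_false_eq_true, if_true, hc,
          List.any_cons, ih]
        cases cpiCandTest pw (PySem.Str.lower v) <;> simp

-- A equals "some raw candidate passes the guarded substring test"
theorem portA_eq_any (pw' : String) (ui : List (String × String)) :
    contains_personal_info_py pw' ui = (cpiRaw ui).any (cpiCandTest (PySem.Str.lower pw')) := by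
  unfold contains_personal_info_py cpiRaw
  simp only [ciFieldLoop_eq_any, ciDomainLoop_eq_any, List.any_append]
  generalize PySem.Str.lower pw' = pw
  cases hmail : ciGet ui "email" with
  | none => simp only [Bool.false_eq_true, if_false, List.any_nil, Bool.false_or]
  | some e =>
    by_cases he : e = ""
    · simp only [he, ne_eq, not_true_eq_false, ite_false, Bool.false_eq_true, List.any_nil,
        Bool.false_or]
    · simp only [ne_eq, he, not_false_eq_true, ite_true]
      generalize ciSplit (PySem.Str.lower e) "@" = parts
      have hu : (decide (3 ≤ PySem.Str.len (parts.headD "")) &&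
          PySem.Str.isIn (parts.headD "") pw) = cpiCandTest pw (parts.headD "") := rfl
      rw [hu]
      by_cases hlg : parts.length > 1
      · simp only [if_pos hlg, List.any_cons]
        cases hT : cpiCandTest pw (parts.headD "") <;>
          cases hD : (ciSplit (parts.getD 1 "") ".").any (cpiCandTest pw) <;> simp_all
      · simp only [if_neg hlg, List.any_cons, List.any_nil]
        cases hT : cpiCandTest pw (parts.headD "") <;> simp_all

-- a guarded add, characterized by membership
theorem mem_addIf (s : PySem.Set String) (t x : String) :
    x ∈ (if decide (3 ≤ PySem.Str.len t) then PySem.Set.add s t else s) ↔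
      x ∈ s ∨ (x = t ∧ 3 ≤ PySem.Str.len x) := by
  split_ifs with h
  · rw [PySem.Set.mem_add]
    simp only [decide_eq_true_eq] at h
    constructor
    · rintro (h1 | rfl)
      · exact Or.inl h1
      · exact Or.inr ⟨rfl, h⟩
    · rintro (h1 | ⟨rfl, _⟩)
      · exact Or.inl h1
      · exact Or.inr rfl
  · simp only [decide_eq_true_eq] at h
    constructor
    · exact Or.inl
    · rintro (h1 | ⟨rfl, h3⟩)
      · exact h1
      · exact absurd h3 h

-- membership through a fold of guarded adds
theorem mem_foldl_addIf (l : List String) (s : PySem.Set String) (x : String) :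
    x ∈ l.foldl (fun s p => if decide (3 ≤ PySem.Str.len p) then PySem.Set.add s p else s) s ↔
      x ∈ s ∨ (x ∈ l ∧ 3 ≤ PySem.Str.len x) := by
  induction l generalizing s with
  | nil => simp
  | cons p rest ih =>
    rw [List.foldl_cons, ih, mem_addIf, List.mem_cons]
    tauto

-- one step of B's name-field fold, characterized by membership
theorem mem_fieldStep (ui : List (String × String)) (s : PySem.Set String) (field x : String) :
    x ∈ (match ciGet ui field with
         | some v =>
           if v ≠ "" then
             (if decide (3 ≤ PySem.Str.len (PySem.Str.lower v)) then
               PySem.Set.add s (PySem.Str.lower v) else s)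
           else s
         | none => s) ↔
      x ∈ s ∨ (cpiNameOf ui field = some x ∧ 3 ≤ PySem.Str.len x) := by
  unfold cpiNameOf
  cases h : ciGet ui field with
  | none => simp
  | some v =>
    by_cases hv : v = ""
    · simp [hv]
    · simp only [ne_eq, hv, not_false_eq_true, if_true]
      rw [mem_addIf]
      constructor
      · rintro (h1 | ⟨rfl, h3⟩)
        · exact Or.inl h1
        · exact Or.inr ⟨rfl, h3⟩
      · rintro (h1 | ⟨hx, h3⟩)
        · exact Or.inl h1
        · injection hx with hx
          exact Or.inr ⟨hx.symm, h3⟩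

-- membership in B's token set = raw candidate of length ≥ 3
theorem mem_cpiTokens (ui : List (String × String)) (x : String) :
    x ∈ cpiTokens ui ↔ x ∈ cpiRaw ui ∧ 3 ≤ PySem.Str.len x := by
  have hfm : x ∈ List.filterMap (cpiNameOf ui) ["first_name", "last_name"] ↔
      cpiNameOf ui "first_name" = some x ∨ cpiNameOf ui "last_name" = some x := by
    simp only [List.mem_filterMap, List.mem_cons, List.not_mem_nil]
    constructor
    · rintro ⟨a, (rfl | rfl | h), ha⟩
      · exact Or.inl ha
      · exact Or.inr ha
      · exact absurd h (by simp)
    · rintro (h | h)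
      · exact ⟨_, Or.inl rfl, h⟩
      · exact ⟨_, Or.inr (Or.inl rfl), h⟩
  unfold cpiTokens cpiRaw
  simp only []
  rw [List.foldl_cons, List.foldl_cons, List.foldl_nil, mem_fieldStep, mem_fieldStep,
    List.mem_append, hfm]
  cases hmail : ciGet ui "email" with
  | none =>
    simp only [List.not_mem_nil, false_or]
    have he : x ∈ (PySem.Set.empty : PySem.Set String) ↔ False := by
      simp [PySem.Set.empty]
    rw [he]
    tauto
  | some e =>
    by_cases he : e = ""
    · simp only [he, ne_eq, not_true_eq_false, if_false]
      have hemp : x ∈ (PySem.Set.empty : PySem.Set String) ↔ False := by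
        simp [PySem.Set.empty]
      rw [hemp]
      tauto
    · simp only [ne_eq, he, not_false_eq_true, if_true]
      generalize ciSplit (PySem.Str.lower e) "@" = parts
      have hemp : ∀ y : String, y ∈ (PySem.Set.empty : PySem.Set String) ↔ False := by
        simp [PySem.Set.empty]
      have hnil : x ∈ ([] : List String) ↔ False := by simp
      by_cases hlg : parts.length > 1
      · rw [if_pos hlg, if_pos hlg, mem_foldl_addIf, mem_addIf, hemp, List.mem_cons]
        tauto
      · rw [if_neg hlg, if_neg hlg, mem_addIf, hemp, List.mem_cons, hnil]
        tauto

-- a window of the password is an infix of it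
theorem slice_isInfix (pw : String) (j n : Nat) :
    (PySem.Str.slice pw (some (j : Int)) (some ((j : Int) + (n : Int)))).toList <:+: pw.toList := by
  rw [PySem.Str.toList_slice, PySem.Chars.slice_eq_listSlice, PySem.List.slice_natCast_add]
  exact ((List.take_prefix n (List.drop j pw.toList)).isInfix).trans
    ((List.drop_suffix j pw.toList).isInfix)

-- THE KEY LEMMA: the window scan over the password finds a token of the set
-- exactly when some token of the set occurs as a substring of the password.
theorem window_scan_eq_any (pw : String) (toks : List String) :
    ((PySem.Set.ofList (toks.map PySem.Str.len)).any (fun L =>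
      (PySem.List.pyRange 0 (PySem.Str.len pw - L + 1) 1).any (fun i =>
        PySem.Set.contains toks (PySem.Str.slice pw (some i) (some (i + L))))))
    = toks.any (fun tok => PySem.Str.isIn tok pw) := by
  rw [Bool.eq_iff_iff]
  simp only [List.any_eq_true]
  constructor
  · rintro ⟨L, hL, i, hi, hc⟩
    rw [PySem.Set.mem_ofList] at hL
    obtain ⟨t, _, rfl⟩ := List.mem_map.mp hL
    have hi' := PySem.List.mem_pyRange_one.mp hi
    have hLnn : (0:Int) ≤ PySem.Str.len t := by rw [PySem.Str.len_eq]; positivity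
    -- the found window is itself a token, and it is an infix of pw
    have hmem : (PySem.Str.slice pw (some i) (some (i + PySem.Str.len t))) ∈ toks := by
      simpa [PySem.Set.contains] using hc
    refine ⟨_, hmem, ?_⟩
    rw [PySem.Str.isIn_iff_infix]
    have h1 : i = ((i.toNat : Nat) : Int) := by omega
    have h2 : PySem.Str.len t = (((PySem.Str.len t).toNat : Nat) : Int) := by omega
    rw [h1, h2]
    exact slice_isInfix pw i.toNat (PySem.Str.len t).toNat
  · rintro ⟨tok, htok, hin⟩
    refine ⟨PySem.Str.len tok, PySem.Set.mem_ofList _ _ |>.mpr (List.mem_map_of_mem htok), ?_⟩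
    rw [PySem.Str.isIn_iff_infix] at hin
    obtain ⟨j0, hpre⟩ := (PySem.Chars.exists_prefix_drop_iff_isIn tok.toList pw.toList).mpr
      (by rw [← PySem.Str.isIn_eq, PySem.Str.isIn_iff_infix]; exact hin)
    -- normalize the drop position into range
    set j := min j0 pw.toList.length with hj
    have hpre' : tok.toList <+: List.drop j pw.toList := by
      by_cases h : j0 ≤ pw.toList.length
      · rw [hj, min_eq_left h]; exact hpre
      · have : List.drop j0 pw.toList = [] := List.drop_eq_nil_of_le (by omega)
        have htok0 : tok.toList = [] := List.prefix_nil.mp (this ▸ hpre)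
        simp [htok0]
    have hlen : tok.toList.length + j ≤ pw.toList.length := by
      have := hpre'.length_le
      simp only [List.length_drop] at this
      omega
    refine ⟨(j : Int), PySem.List.mem_pyRange_one.mpr ⟨by positivity, ?_⟩, ?_⟩
    · rw [PySem.Str.len_eq, PySem.Str.len_eq]; omega
    · have hslice : PySem.Str.slice pw (some (j:Int)) (some ((j:Int) + PySem.Str.len tok)) = tok := by
        rw [← String.toList_inj, PySem.Str.toList_slice, PySem.Chars.slice_eq_listSlice,
          PySem.Str.len_eq, PySem.List.slice_natCast_add]
        exact (List.prefix_iff_eq_take.mp hpre').symm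
      rw [hslice]
      simpa [PySem.Set.contains] using htok
-- ===== VERDICT =====
theorem contains_personal_info_py_spec : Claim_equal_contains_personal_info_py := by
  intro password user_info _
  show contains_personal_info_py password user_info = contains_personal_info_py_alt password user_info
  rw [portA_eq_any]
  unfold contains_personal_info_py_alt
  rw [window_scan_eq_any]
  rw [Bool.eq_iff_iff]
  simp only [List.any_eq_true]
  constructor
  · rintro ⟨tok, htok, htest⟩
    simp only [cpiCandTest, Bool.and_eq_true, decide_eq_true_eq] at htest
    exact ⟨tok, (mem_cpiTokens user_info tok).mpr ⟨htok, htest.1⟩, htest.2⟩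
  · rintro ⟨tok, htok, hin⟩
    obtain ⟨h1, h2⟩ := (mem_cpiTokens user_info tok).mp htok
    refine ⟨tok, h1, ?_⟩
    simp only [cpiCandTest, Bool.and_eq_true, decide_eq_true_eq]
    exact ⟨h2, hin⟩
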